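-- pv_equiv track=rewrite | github.com/Burla-Cloud/examples | merge_unhinged.py | _category_class
-- ===== SOURCE A (Python) =====
-- from typing import Any, Dict, List
--
-- def _category_class(cats: Dict[str, Dict[str, int]]) -> str:
--     """Label for UI badges. Priorities: RS_HARD > RS > HOM > ABL > SEX > XEN > VULG."""
--     if not cats:
--         return ""
--     order = ["RS_HARD", "RS", "HOM", "XEN", "ABL", "SEX", "VULG"]
--     for k in order:
--         if k in cats:
--             return {
--                 "RS_HARD": "RACIAL_SLUR",
--                 "RS":      "RACIAL_SLUR",
--                 "HOM":     "HOMOPHOBIC_SLUR",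
--                 "ABL":     "ABLEIST_SLUR",
--                 "SEX":     "GENDERED_SLUR",
--                 "XEN":     "XENOPHOBIC_SLUR",
--                 "VULG":    "PROFANITY",
--             }[k]
--     return ""
-- ===== SOURCE B (Python) =====
-- def _category_class(cats):
--     """Label for UI badges. Priorities: RS_HARD > RS > HOM > ABL > SEX > XEN > VULG."""
--     RANK = {
--         "RS_HARD": (0, "RACIAL_SLUR"),
--         "RS":      (1, "RACIAL_SLUR"),
--         "HOM":     (2, "HOMOPHOBIC_SLUR"),
--         "ABL":     (3, "ABLEIST_SLUR"),
--         "SEX":     (4, "GENDERED_SLUR"),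
--         "XEN":     (5, "XENOPHOBIC_SLUR"),
--         "VULG":    (6, "PROFANITY"),
--     }
--     best = None
--     for k in cats:
--         r = RANK.get(k)
--         if r is not None and (best is None or r[0] < best[0]):
--             best = r
--     return best[1] if best is not None else ""
-- ===== Notes on version B (the rewrite author's own statement) =====
-- stated objective: alternative
-- what changed: Replaces the first-hit scan over a fixed priority list by a single pass over the input keys maintaining the minimum (rank, label) from one key->rank table, and ranks follow the documented priority ABL > SEX > XEN which A's order list contradicts.
-- intended difference: On inputs containing XEN together with ABL or SEX but none of RS_HARD/RS/HOM, A returns XENOPHOBIC_SLUR because its order list puts XEN before ABL and SEX, while B returns ABLEIST_SLUR (or GENDERED_SLUR), matching A's own docstring priority RS_HARD > RS > HOM > ABL > SEX > XEN > VULG, which is the intended order. — e.g. on _category_class([("XEN", []), ("ABL", [])]): A returns "XENOPHOBIC_SLUR", B returns "ABLEIST_SLUR"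
import Mathlib
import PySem

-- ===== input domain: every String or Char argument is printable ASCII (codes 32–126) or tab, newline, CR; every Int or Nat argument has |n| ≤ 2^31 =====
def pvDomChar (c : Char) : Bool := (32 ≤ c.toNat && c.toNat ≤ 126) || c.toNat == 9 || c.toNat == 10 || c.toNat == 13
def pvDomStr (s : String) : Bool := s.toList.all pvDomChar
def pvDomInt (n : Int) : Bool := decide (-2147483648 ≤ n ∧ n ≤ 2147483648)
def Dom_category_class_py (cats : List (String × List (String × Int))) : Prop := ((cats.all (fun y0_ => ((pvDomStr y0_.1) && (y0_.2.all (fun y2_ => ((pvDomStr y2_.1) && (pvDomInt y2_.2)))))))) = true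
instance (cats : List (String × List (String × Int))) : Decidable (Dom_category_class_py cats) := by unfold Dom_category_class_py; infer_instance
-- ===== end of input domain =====

-- B replaces A's first-hit scan over a fixed priority list by one pass over the input keys
-- keeping the minimum (rank, label) from a key→rank table, ranked by the documented priority
-- RS_HARD > RS > HOM > ABL > SEX > XEN > VULG (A's order list wrongly puts XEN before ABL/SEX).

set_option maxHeartbeats 1000000

-- ===== PORT A =====
-- the literal dict {"RS_HARD": "RACIAL_SLUR", ...}[k]; only reached with k from the order
-- list, on which every key is present, so getD's default is never used (no KeyError).
def pvLabelA (k : String) : String :=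
  PySem.Dict.getD (PySem.Dict.ofList
    [("RS_HARD", "RACIAL_SLUR"), ("RS", "RACIAL_SLUR"), ("HOM", "HOMOPHOBIC_SLUR"),
     ("ABL", "ABLEIST_SLUR"), ("SEX", "GENDERED_SLUR"), ("XEN", "XENOPHOBIC_SLUR"),
     ("VULG", "PROFANITY")]) k ""

-- "for k in order: if k in cats: return {...}[k]"; falls through to ""
def pvFindA (cats : List (String × List (String × Int))) : List String → String
  | [] => ""
  | k :: rest => if (cats.map Prod.fst).contains k then pvLabelA k else pvFindA cats rest

def category_class_py (cats : List (String × List (String × Int))) : String :=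
  if cats = [] then ""
  else pvFindA cats ["RS_HARD", "RS", "HOM", "XEN", "ABL", "SEX", "VULG"]

-- ===== PORT B =====
-- RANK.get(k)
def pvRank (k : String) : Option (Int × String) :=
  PySem.Dict.get? (PySem.Dict.ofList
    [("RS_HARD", ((0 : Int), "RACIAL_SLUR")), ("RS", ((1 : Int), "RACIAL_SLUR")),
     ("HOM", ((2 : Int), "HOMOPHOBIC_SLUR")), ("ABL", ((3 : Int), "ABLEIST_SLUR")),
     ("SEX", ((4 : Int), "GENDERED_SLUR")), ("XEN", ((5 : Int), "XENOPHOBIC_SLUR")),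
     ("VULG", ((6 : Int), "PROFANITY"))]) k

-- loop body: keep the lower-ranked of best and RANK.get(k)
def pvStep (best : Option (Int × String)) (kv : String × List (String × Int)) :
    Option (Int × String) :=
  match pvRank kv.1 with
  | none => best
  | some r =>
    match best with
    | none => some r
    | some b => if r.1 < b.1 then some r else best

def category_class_py_alt (cats : List (String × List (String × Int))) : String :=
  match cats.foldl pvStep none with
  | none => ""
  | some b => b.2

-- ===== PRECONDITION & SPEC =====
-- On inputs containing XEN together with ABL or SEX but none of RS_HARD/RS/HOM, A returns
-- "XENOPHOBIC_SLUR" (its order list puts XEN before ABL and SEX) while B returns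
-- "ABLEIST_SLUR" or "GENDERED_SLUR", matching A's own docstring priority
-- RS_HARD > RS > HOM > ABL > SEX > XEN > VULG, which is the intended order.
def D_category_class_py (cats : List (String × List (String × Int))) : Prop :=
  (cats.map Prod.fst).contains "RS_HARD" = false ∧
  (cats.map Prod.fst).contains "RS" = false ∧
  (cats.map Prod.fst).contains "HOM" = false ∧
  (cats.map Prod.fst).contains "XEN" = true ∧
  ((cats.map Prod.fst).contains "ABL" = true ∨ (cats.map Prod.fst).contains "SEX" = true)
instance (cats : List (String × List (String × Int))) : Decidable (D_category_class_py cats) := by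
  unfold D_category_class_py; infer_instance

def Spec_category_class_py (cats : List (String × List (String × Int))) (out : String) : Prop :=
  ¬ D_category_class_py cats → out = category_class_py_alt cats
instance (cats : List (String × List (String × Int))) (out : String) :
    Decidable (Spec_category_class_py cats out) := by unfold Spec_category_class_py; infer_instance

def pvDiffWitness_category_class_py : (List (String × List (String × Int))) :=
  [("XEN", []), ("ABL", [])]
def pvDiffWitnessOut_category_class_py : String × String := ("XENOPHOBIC_SLUR", "ABLEIST_SLUR")

-- ===== CLAIM (what is proved, stated in full; the proofs are below) =====
def Claim_unchanged_category_class_py : Prop := ∀ (cats : List (String × List (String × Int))), Dom_category_class_py cats → Spec_category_class_py cats (category_class_py cats)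
def Claim_changed_category_class_py : Prop := Dom_category_class_py (pvDiffWitness_category_class_py) ∧ D_category_class_py (pvDiffWitness_category_class_py) ∧ category_class_py (pvDiffWitness_category_class_py) = pvDiffWitnessOut_category_class_py.1 ∧ category_class_py_alt (pvDiffWitness_category_class_py) = pvDiffWitnessOut_category_class_py.2 ∧ pvDiffWitnessOut_category_class_py.1 ≠ pvDiffWitnessOut_category_class_py.2
def Claim_exact_category_class_py : Prop := ∀ (cats : List (String × List (String × Int))), Dom_category_class_py cats → D_category_class_py cats → category_class_py cats ≠ category_class_py_alt cats

-- ===== LEMMAS AND PROOFS =====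

-- left-biased minimum by rank index
def pvMerge (a b : Option (Int × String)) : Option (Int × String) :=
  match a, b with
  | none, b => b
  | a, none => a
  | some a, some b => if b.1 < a.1 then some b else some a

theorem pvStep_eq_merge (acc : Option (Int × String)) (kv : String × List (String × Int)) :
    pvStep acc kv = pvMerge acc (pvRank kv.1) := by
  unfold pvStep pvMerge
  cases pvRank kv.1 <;> cases acc <;> rfl

theorem pvMerge_assoc (a b c : Option (Int × String)) :
    pvMerge (pvMerge a b) c = pvMerge a (pvMerge b c) := by
  cases a <;> cases b <;> cases c <;>
    simp only [pvMerge] <;> split_ifs <;> (try simp only [pvMerge]) <;> (try split_ifs) <;>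
    first | rfl | omega

theorem pvFold_merge (cats : List (String × List (String × Int)))
    (acc : Option (Int × String)) :
    cats.foldl pvStep acc = pvMerge acc (cats.foldl pvStep none) := by
  induction cats generalizing acc with
  | nil => cases acc <;> rfl
  | cons kv t ih =>
    simp only [List.foldl_cons]
    rw [ih (pvStep acc kv), ih (pvStep none kv), pvStep_eq_merge, pvStep_eq_merge,
      pvMerge_assoc]
    rfl

-- the membership chains both programs reduce to (b's are the contains-flags of the 7 keys)
def pvChainA (b1 b2 b3 b4 b5 b6 b7 : Bool) : String :=
  if b1 then "RACIAL_SLUR" else if b2 then "RACIAL_SLUR" else if b3 then "HOMOPHOBIC_SLUR"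
  else if b4 then "XENOPHOBIC_SLUR" else if b5 then "ABLEIST_SLUR"
  else if b6 then "GENDERED_SLUR" else if b7 then "PROFANITY" else ""

def pvChainB (b1 b2 b3 b4 b5 b6 b7 : Bool) : Option (Int × String) :=
  if b1 then some (0, "RACIAL_SLUR") else if b2 then some (1, "RACIAL_SLUR")
  else if b3 then some (2, "HOMOPHOBIC_SLUR") else if b5 then some (3, "ABLEIST_SLUR")
  else if b6 then some (4, "GENDERED_SLUR") else if b4 then some (5, "XENOPHOBIC_SLUR")
  else if b7 then some (6, "PROFANITY") else none

theorem a_char (hd : String × List (String × Int)) (tl : List (String × List (String × Int))) :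
    category_class_py (hd :: tl) =
      pvChainA (((hd :: tl).map Prod.fst).contains "RS_HARD")
        (((hd :: tl).map Prod.fst).contains "RS") (((hd :: tl).map Prod.fst).contains "HOM")
        (((hd :: tl).map Prod.fst).contains "XEN") (((hd :: tl).map Prod.fst).contains "ABL")
        (((hd :: tl).map Prod.fst).contains "SEX") (((hd :: tl).map Prod.fst).contains "VULG") := by
  show (if (hd :: tl) = [] then "" else pvFindA (hd :: tl) _) = _
  simp only [reduceCtorEq, if_false, pvFindA, pvChainA,
    show pvLabelA "RS_HARD" = "RACIAL_SLUR" from rfl,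
    show pvLabelA "RS" = "RACIAL_SLUR" from rfl,
    show pvLabelA "HOM" = "HOMOPHOBIC_SLUR" from rfl,
    show pvLabelA "XEN" = "XENOPHOBIC_SLUR" from rfl,
    show pvLabelA "ABL" = "ABLEIST_SLUR" from rfl,
    show pvLabelA "SEX" = "GENDERED_SLUR" from rfl,
    show pvLabelA "VULG" = "PROFANITY" from rfl]

theorem pvDictmk : (PySem.Dict.ofList
    [("RS_HARD", ((0 : Int), "RACIAL_SLUR")), ("RS", ((1 : Int), "RACIAL_SLUR")),
     ("HOM", ((2 : Int), "HOMOPHOBIC_SLUR")), ("ABL", ((3 : Int), "ABLEIST_SLUR")),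
     ("SEX", ((4 : Int), "GENDERED_SLUR")), ("XEN", ((5 : Int), "XENOPHOBIC_SLUR")),
     ("VULG", ((6 : Int), "PROFANITY"))]) = PySem.Dict.mk
    [("RS_HARD", ((0 : Int), "RACIAL_SLUR")), ("RS", ((1 : Int), "RACIAL_SLUR")),
     ("HOM", ((2 : Int), "HOMOPHOBIC_SLUR")), ("ABL", ((3 : Int), "ABLEIST_SLUR")),
     ("SEX", ((4 : Int), "GENDERED_SLUR")), ("XEN", ((5 : Int), "XENOPHOBIC_SLUR")),
     ("VULG", ((6 : Int), "PROFANITY"))] := by decide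

theorem pvRank_none (k : String) (h1 : k ≠ "RS_HARD") (h2 : k ≠ "RS") (h3 : k ≠ "HOM")
    (h4 : k ≠ "XEN") (h5 : k ≠ "ABL") (h6 : k ≠ "SEX") (h7 : k ≠ "VULG") :
    pvRank k = none := by
  simp [pvRank, pvDictmk, Ne.symm h1, Ne.symm h2, Ne.symm h3,
    Ne.symm h4, Ne.symm h5, Ne.symm h6, Ne.symm h7, PySem.Dict.get?]

theorem pvMerge_none (b : Option (Int × String)) : pvMerge none b = b := rfl

theorem b_char (cats : List (String × List (String × Int))) :
    cats.foldl pvStep none =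
      pvChainB ((cats.map Prod.fst).contains "RS_HARD") ((cats.map Prod.fst).contains "RS")
        ((cats.map Prod.fst).contains "HOM") ((cats.map Prod.fst).contains "XEN")
        ((cats.map Prod.fst).contains "ABL") ((cats.map Prod.fst).contains "SEX")
        ((cats.map Prod.fst).contains "VULG") := by
  induction cats with
  | nil => rfl
  | cons kv t ih =>
    rw [List.foldl_cons, pvFold_merge t (pvStep none kv), ih, pvStep_eq_merge, pvMerge_none]
    obtain ⟨k, v⟩ := kv
    simp only [List.map_cons, List.contains_cons]
    clear ih
    generalize (List.map Prod.fst t).contains "RS_HARD" = c1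
    generalize (List.map Prod.fst t).contains "RS" = c2
    generalize (List.map Prod.fst t).contains "HOM" = c3
    generalize (List.map Prod.fst t).contains "XEN" = c4
    generalize (List.map Prod.fst t).contains "ABL" = c5
    generalize (List.map Prod.fst t).contains "SEX" = c6
    generalize (List.map Prod.fst t).contains "VULG" = c7
    by_cases h1 : k = "RS_HARD"
    · subst h1; revert c1 c2 c3 c4 c5 c6 c7; decide
    by_cases h2 : k = "RS"
    · subst h2; revert c1 c2 c3 c4 c5 c6 c7; decide
    by_cases h3 : k = "HOM"
    · subst h3; revert c1 c2 c3 c4 c5 c6 c7; decide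
    by_cases h4 : k = "XEN"
    · subst h4; revert c1 c2 c3 c4 c5 c6 c7; decide
    by_cases h5 : k = "ABL"
    · subst h5; revert c1 c2 c3 c4 c5 c6 c7; decide
    by_cases h6 : k = "SEX"
    · subst h6; revert c1 c2 c3 c4 c5 c6 c7; decide
    by_cases h7 : k = "VULG"
    · subst h7; revert c1 c2 c3 c4 c5 c6 c7; decide
    · rw [pvRank_none k h1 h2 h3 h4 h5 h6 h7, pvMerge_none]
      have e1 : ("RS_HARD" == k) = false := beq_eq_false_iff_ne.mpr (Ne.symm h1)
      have e2 : ("RS" == k) = false := beq_eq_false_iff_ne.mpr (Ne.symm h2)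
      have e3 : ("HOM" == k) = false := beq_eq_false_iff_ne.mpr (Ne.symm h3)
      have e4 : ("XEN" == k) = false := beq_eq_false_iff_ne.mpr (Ne.symm h4)
      have e5 : ("ABL" == k) = false := beq_eq_false_iff_ne.mpr (Ne.symm h5)
      have e6 : ("SEX" == k) = false := beq_eq_false_iff_ne.mpr (Ne.symm h6)
      have e7 : ("VULG" == k) = false := beq_eq_false_iff_ne.mpr (Ne.symm h7)
      rw [e1, e2, e3, e4, e5, e6, e7]
      simp only [Bool.false_or]

-- ===== VERDICT (by name: the statement is the Claim_ definition above) =====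
theorem category_class_py_spec : Claim_unchanged_category_class_py := by
  intro cats _ hnD
  cases cats with
  | nil => rfl
  | cons hd tl =>
    unfold category_class_py_alt
    rw [a_char, b_char]
    unfold D_category_class_py at hnD
    simp only [List.map_cons] at *
    revert hnD
    generalize (((hd.1 :: tl.map Prod.fst)).contains "RS_HARD") = b1
    generalize (((hd.1 :: tl.map Prod.fst)).contains "RS") = b2
    generalize (((hd.1 :: tl.map Prod.fst)).contains "HOM") = b3
    generalize (((hd.1 :: tl.map Prod.fst)).contains "XEN") = b4
    generalize (((hd.1 :: tl.map Prod.fst)).contains "ABL") = b5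
    generalize (((hd.1 :: tl.map Prod.fst)).contains "SEX") = b6
    generalize (((hd.1 :: tl.map Prod.fst)).contains "VULG") = b7
    revert b1 b2 b3 b4 b5 b6 b7
    decide

theorem category_class_py_changed : Claim_changed_category_class_py := by
  unfold Claim_changed_category_class_py; decide

theorem category_class_py_tight : Claim_exact_category_class_py := by
  unfold Claim_exact_category_class_py
  intro cats _ hDin
  cases cats with
  | nil => simp [D_category_class_py] at hDin
  | cons hd tl =>
    unfold category_class_py_alt
    rw [a_char, b_char]
    unfold D_category_class_py at hDin
    simp only [List.map_cons] at *
    revert hDin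
    generalize (((hd.1 :: tl.map Prod.fst)).contains "RS_HARD") = b1
    generalize (((hd.1 :: tl.map Prod.fst)).contains "RS") = b2
    generalize (((hd.1 :: tl.map Prod.fst)).contains "HOM") = b3
    generalize (((hd.1 :: tl.map Prod.fst)).contains "XEN") = b4
    generalize (((hd.1 :: tl.map Prod.fst)).contains "ABL") = b5
    generalize (((hd.1 :: tl.map Prod.fst)).contains "SEX") = b6
    generalize (((hd.1 :: tl.map Prod.fst)).contains "VULG") = b7
    revert b1 b2 b3 b4 b5 b6 b7
    decide
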